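-- pv_equiv track=rewrite | github.com/ursakumeljfaks/Prakticna-matematika | 1.letnik/programiranje1/izpiti/izpitiPeF.py | razkrij
-- ===== SOURCE A (Python) =====
-- def razkrij(stavek):
--     odkodirani = ""
--     spustimo = 0
--     for indeks, crka in enumerate(stavek):
--         if spustimo == 0:
--             if crka in "aeiou":
--                 odkodirani += crka
--                 spustimo += 2
--             else:
--                 odkodirani += crka
--         else:
--             spustimo -= 1
--     return odkodirani
-- ===== SOURCE B (Python) =====
-- def razkrij(stavek):
--     parts = []
--     s = stavek
--     while s:
--         j = next((k for k, c in enumerate(s) if c in "aeiou"), None)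
--         if j is None:
--             parts.append(s)
--             break
--         parts.append(s[:j + 1])
--         s = s[j + 3:]
--     return "".join(parts)
-- ===== Notes on version B (the rewrite author's own statement) =====
-- stated objective: alternative
-- what changed: Replaces the per-character skip-counter state machine with a chunking loop: find the index of the next vowel, emit the whole slice up to and including it, drop that slice plus the two skipped characters, and join the collected chunks at the end.
import Mathlib
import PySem

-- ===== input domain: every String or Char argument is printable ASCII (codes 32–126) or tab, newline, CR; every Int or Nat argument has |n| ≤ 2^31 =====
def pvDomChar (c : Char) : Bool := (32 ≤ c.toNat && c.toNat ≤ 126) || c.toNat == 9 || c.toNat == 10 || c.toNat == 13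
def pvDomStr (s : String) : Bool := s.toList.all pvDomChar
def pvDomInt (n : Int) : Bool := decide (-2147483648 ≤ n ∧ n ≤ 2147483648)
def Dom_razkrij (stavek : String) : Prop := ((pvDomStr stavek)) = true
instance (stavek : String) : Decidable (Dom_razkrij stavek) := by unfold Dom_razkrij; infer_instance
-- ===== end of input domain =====

-- B replaces A's per-character skip-counter state machine with a chunking loop (find next vowel,
-- emit the slice through it, drop two more, repeat); alternative decomposition, same result.

-- crka in "aeiou"
def pvVowel (crka : Char) : Bool := "aeiou".toList.contains crka

-- ===== PORT A =====
-- A: fold over the characters with state (accumulated output, skip counter); the enumerate index is unused.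
def razkrijStepA (st : List Char × Int) (crka : Char) : List Char × Int :=
  if st.2 = 0 then
    if pvVowel crka then (st.1 ++ [crka], st.2 + 2)
    else (st.1 ++ [crka], st.2)
  else (st.1, st.2 - 1)

def razkrij (stavek : String) : String :=
  String.ofList (stavek.toList.foldl razkrijStepA ([], 0)).1

-- ===== PORT B =====
-- B's while loop as recursion on s: if s is empty stop; find the index j of the first vowel
-- (none → emit the rest and stop); else emit the chunk s[:j+1] and continue on s[j+3:].
-- s[:j+1] and s[j+3:] are take/drop: exact, since the bounds are nonnegative.
def razkrijGoB (s : List Char) : List Char :=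
  if s = [] then []
  else
    match s.findIdx? pvVowel with
    | none => s
    | some j => s.take (j + 1) ++ razkrijGoB (s.drop (j + 3))
termination_by s.length
decreasing_by
  rename_i hne
  have : s.length ≠ 0 := fun h => hne (List.eq_nil_of_length_eq_zero h)
  simp [List.length_drop]; omega

def razkrij_alt (stavek : String) : String :=
  String.ofList (razkrijGoB stavek.toList)

-- ===== PRECONDITION & SPEC =====
def Spec_razkrij (stavek : String) (out : String) : Prop := out = razkrij_alt stavek
instance (stavek : String) (out : String) : Decidable (Spec_razkrij stavek out) := by unfold Spec_razkrij; infer_instance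

-- ===== CLAIM (what is proved, stated in full; the proofs are below) =====
def Claim_equal_razkrij : Prop := ∀ (stavek : String), Dom_razkrij stavek → Spec_razkrij stavek (razkrij stavek)

-- ===== LEMMAS AND PROOFS =====

-- Middle specification: the simple structural recursion both ports are proved equal to.
def goSpec : List Char → List Char
  | [] => []
  | c :: rest => if pvVowel c then c :: goSpec (rest.drop 2) else c :: goSpec rest
termination_by l => l.length
decreasing_by
  all_goals simp [List.length_drop]

-- A's fold started with skip counter n produces the same output as starting fresh after dropping n characters.
theorem razkrij_skip (l : List Char) : ∀ (n : Nat) (acc : List Char),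
    (l.foldl razkrijStepA (acc, (n : Int))).1 = ((l.drop n).foldl razkrijStepA (acc, 0)).1 := by
  induction l with
  | nil => intro n acc; simp
  | cons c rest ih =>
    intro n acc
    cases n with
    | zero => simp
    | succ k =>
      have hne : ¬ (((k + 1 : Nat) : Int) = 0) := by push_cast; omega
      have hstep : razkrijStepA (acc, ((k + 1 : Nat) : Int)) c = (acc, ((k + 1 : Nat) : Int) - 1) := by
        unfold razkrijStepA; rw [if_neg hne]
      have hcast : ((k + 1 : Nat) : Int) - 1 = ((k : Nat) : Int) := by push_cast; ring
      simp only [List.foldl_cons, hstep, hcast, List.drop_succ_cons]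
      exact ih k acc

-- A's fold equals the middle specification.
theorem razkrij_main : ∀ (m : Nat) (l : List Char), l.length ≤ m → ∀ (acc : List Char),
    (l.foldl razkrijStepA (acc, 0)).1 = acc ++ goSpec l := by
  intro m
  induction m with
  | zero =>
    intro l hl acc
    have : l = [] := List.eq_nil_of_length_eq_zero (Nat.le_zero.mp hl)
    subst this; simp [goSpec]
  | succ m ih =>
    intro l hl acc
    cases l with
    | nil => simp [goSpec]
    | cons c rest =>
      by_cases hv : pvVowel c = true
      · have hstep : razkrijStepA (acc, 0) c = (acc ++ [c], (2 : Int)) := by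
          unfold razkrijStepA; rw [if_pos rfl, if_pos hv]; simp
        have h2 : ((2 : Nat) : Int) = (2 : Int) := by norm_num
        have hdroplen : (rest.drop 2).length ≤ m := by
          simp at hl ⊢; omega
        calc (List.foldl razkrijStepA (acc, 0) (c :: rest)).1
            = (List.foldl razkrijStepA (acc ++ [c], ((2 : Nat) : Int)) rest).1 := by
              simp only [List.foldl_cons, hstep, h2]
          _ = ((rest.drop 2).foldl razkrijStepA (acc ++ [c], 0)).1 := razkrij_skip rest 2 _
          _ = (acc ++ [c]) ++ goSpec (rest.drop 2) := ih _ hdroplen _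
          _ = acc ++ goSpec (c :: rest) := by
              simp only [goSpec]; rw [if_pos hv]; simp
      · have hstep : razkrijStepA (acc, 0) c = (acc ++ [c], (0 : Int)) := by
          unfold razkrijStepA; rw [if_pos rfl, if_neg hv]
        have hlen : rest.length ≤ m := by simp at hl; omega
        calc (List.foldl razkrijStepA (acc, 0) (c :: rest)).1
            = (List.foldl razkrijStepA (acc ++ [c], 0) rest).1 := by
              simp only [List.foldl_cons, hstep]
          _ = (acc ++ [c]) ++ goSpec rest := ih _ hlen _
          _ = acc ++ goSpec (c :: rest) := by
              simp only [goSpec]; rw [if_neg hv]; simp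

-- If there is no vowel, goSpec is the identity.
theorem goSpec_of_no_vowel : ∀ (l : List Char), l.findIdx? pvVowel = none → goSpec l = l := by
  intro l h
  induction l with
  | nil => simp [goSpec]
  | cons c rest ih =>
    rw [List.findIdx?_cons] at h
    by_cases hv : pvVowel c = true
    · simp [hv] at h
    · simp [hv] at h
      have : rest.findIdx? pvVowel = none := List.findIdx?_eq_none_iff.mpr h
      simp [goSpec, hv, ih this]

-- B's chunking recursion equals the middle specification.
theorem razkrijGoB_eq_goSpec : ∀ (m : Nat) (l : List Char), l.length ≤ m →
    razkrijGoB l = goSpec l := by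
  intro m
  induction m with
  | zero =>
    intro l hl
    have : l = [] := List.eq_nil_of_length_eq_zero (Nat.le_zero.mp hl)
    subst this; simp [razkrijGoB, goSpec]
  | succ m ih =>
    intro l hl
    cases l with
    | nil => simp [razkrijGoB, goSpec]
    | cons c rest =>
      rw [razkrijGoB]
      simp only [List.findIdx?_cons, reduceCtorEq, if_false]
      by_cases hv : pvVowel c = true
      · simp only [hv, if_true]
        have hlen : (rest.drop 2).length ≤ m := by simp at hl ⊢; omega
        simp [goSpec, hv, ih _ hlen]
      · simp only [hv]
        cases hfind : rest.findIdx? pvVowel with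
        | none =>
          simp [goSpec, hv, goSpec_of_no_vowel rest hfind]
        | some j =>
          simp only [Option.map_some]
          have hrest : razkrijGoB rest = goSpec rest := by
            apply ih; simp at hl; omega
          have hrestne : rest ≠ [] := by
            intro h; subst h; simp [List.findIdx?_nil] at hfind
          rw [razkrijGoB, if_neg hrestne, hfind] at hrest
          have hdrop : razkrijGoB (rest.drop (j + 3)) = goSpec (rest.drop (j + 3)) := by
            apply ih
            have : rest.length ≠ 0 := fun h => hrestne (List.eq_nil_of_length_eq_zero h)
            simp at hl; simp [List.length_drop]; omega
          have hrest' : rest.take (j + 1) ++ goSpec (rest.drop (j + 3)) = goSpec rest := by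
            rw [← hdrop]; exact hrest
          simp only [goSpec, hv]
          rw [← hrest']
          simp [List.take_succ_cons, List.drop_succ_cons]
          exact hdrop

-- ===== VERDICT (by name: the statement is the Claim_ definition above) =====
theorem razkrij_spec : Claim_equal_razkrij := by
  intro stavek _
  unfold Spec_razkrij razkrij razkrij_alt
  have hA := razkrij_main stavek.toList.length stavek.toList (le_refl _) []
  have hB := razkrijGoB_eq_goSpec stavek.toList.length stavek.toList (le_refl _)
  simp [hA, hB]
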